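-- pv_equiv track=rewrite | github.com/Digi-Bo/Nodeology | nodeology/node.py | remove_markdown_blocks_formatting
-- ===== SOURCE A (Python) =====
-- def remove_markdown_blocks_formatting(text: str) -> str:
--     """Remove common markdown code block delimiters from text.
--
--     Args:
--         text: Input text containing markdown code blocks
--
--     Returns:
--         str: Text with code block delimiters removed
--     """
--     lines = text.split("\n")
--     cleaned_lines = []
--     in_code_block = False
--
--     for line in lines:
--         stripped_line = line.strip()
--         # Check if line starts with backticks (more robust than exact matches)
--         if stripped_line.startswith("```"):
--             in_code_block = not in_code_block
--             continue
--         if not in_code_block: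
--             cleaned_lines.append(line)
--
--     return "\n".join(cleaned_lines)
-- ===== SOURCE B (Python) =====
-- def remove_markdown_blocks_formatting(text: str) -> str:
--     """Remove common markdown code block delimiters from text."""
--     # Partition the lines into segments separated by fence lines, then keep
--     # only the even-indexed segments (the regions outside code blocks).
--     segments = [[]]
--     for line in text.split("\n"):
--         if line.strip().startswith("```"):
--             segments.append([])
--         else:
--             segments[-1].append(line)
--     kept = [ln for i, seg in enumerate(segments) if i % 2 == 0 for ln in seg]
--     return "\n".join(kept)
-- ===== Notes on version B (the rewrite author's own statement) =====
-- stated objective: alternative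
-- what changed: Replaces the toggling in_code_block state machine with a partition-then-select decomposition: split the lines into segments at fence lines, then keep the even-indexed segments and flatten them.
import Mathlib
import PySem

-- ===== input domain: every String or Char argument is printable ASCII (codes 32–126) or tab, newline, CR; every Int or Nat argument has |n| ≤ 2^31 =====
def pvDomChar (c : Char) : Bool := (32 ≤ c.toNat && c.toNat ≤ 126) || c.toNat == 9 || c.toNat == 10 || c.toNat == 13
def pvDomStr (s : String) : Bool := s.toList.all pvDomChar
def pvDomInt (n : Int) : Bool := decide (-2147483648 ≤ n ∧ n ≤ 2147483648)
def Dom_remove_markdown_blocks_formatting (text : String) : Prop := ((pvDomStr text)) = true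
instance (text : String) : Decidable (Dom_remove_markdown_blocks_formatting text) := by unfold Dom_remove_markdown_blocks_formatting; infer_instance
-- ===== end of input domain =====

-- B replaces A's toggling in_code_block state machine with a partition of the lines into
-- segments at fence lines followed by keeping the even-indexed segments (objective: alternative).

-- ===== PORT A =====
def remove_markdown_blocks_formatting (text : String) : String :=
  let lines := (PySem.Str.split? text "\n").getD []
  let st := lines.foldl (fun (st : Bool × List String) line =>
    if PySem.Str.startswith (PySem.Str.strip line) "```" then (!st.1, st.2)
    else if st.1 then st
    else (st.1, st.2 ++ [line])) (false, [])
  PySem.Str.join "\n" st.2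

-- ===== PORT B =====
def remove_markdown_blocks_formatting_alt (text : String) : String :=
  let lines := (PySem.Str.split? text "\n").getD []
  let segments := lines.foldl (fun (segs : List (List String)) line =>
    if PySem.Str.startswith (PySem.Str.strip line) "```" then segs ++ [[]]
    else segs.dropLast ++ [segs.getLastD [] ++ [line]]) [[]]
  let kept := ((PySem.List.enumerate segments 0).filter (fun p => p.1 % 2 == 0)).flatMap (·.2)
  PySem.Str.join "\n" kept

-- ===== PRECONDITION & SPEC =====
def Spec_remove_markdown_blocks_formatting (text : String) (out : String) : Prop := out = remove_markdown_blocks_formatting_alt text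
instance (text : String) (out : String) : Decidable (Spec_remove_markdown_blocks_formatting text out) := by unfold Spec_remove_markdown_blocks_formatting; infer_instance

-- ===== CLAIM (what is proved, stated in full; the proofs are below) =====
def Claim_equal_remove_markdown_blocks_formatting : Prop := ∀ (text : String), Dom_remove_markdown_blocks_formatting text → Spec_remove_markdown_blocks_formatting text (remove_markdown_blocks_formatting text)

-- ===== LEMMAS AND PROOFS =====

-- fence test shared by both ports
def pvFence (line : String) : Bool := PySem.Str.startswith (PySem.Str.strip line) "```"

-- reference recursion: pvRec b ls = lines kept by A starting in state b
def pvRec (b : Bool) : List String → List String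
  | [] => []
  | l :: ls => if pvFence l then pvRec (!b) ls else if b then pvRec b ls else l :: pvRec b ls

-- A's fold computes pvRec
theorem pvA_fold (ls : List String) : ∀ (b : Bool) (acc : List String),
    (ls.foldl (fun (st : Bool × List String) line =>
      if pvFence line then (!st.1, st.2)
      else if st.1 then st
      else (st.1, st.2 ++ [line])) (b, acc)).2 = acc ++ pvRec b ls := by
  induction ls with
  | nil => intro b acc; simp [pvRec]
  | cons l ls ih =>
    intro b acc
    by_cases hf : pvFence l
    · simp [List.foldl_cons, hf, pvRec, ih]
    · cases b with
      | false => simp [List.foldl_cons, hf, pvRec, ih]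
      | true => simp [List.foldl_cons, hf, pvRec, ih]

-- the segments built so far, functional form: current segment `cur`, remaining lines
def pvSegsF (cur : List String) : List String → List (List String)
  | [] => [cur]
  | l :: ls => if pvFence l then cur :: pvSegsF [] ls else pvSegsF (cur ++ [l]) ls

-- B's fold computes pvSegsF
theorem pvB_fold (ls : List String) : ∀ (init : List (List String)) (cur : List String),
    ls.foldl (fun (segs : List (List String)) line =>
      if pvFence line then segs ++ [[]]
      else segs.dropLast ++ [segs.getLastD [] ++ [line]]) (init ++ [cur])
    = init ++ pvSegsF cur ls := by
  induction ls with
  | nil => intro init cur; simp [pvSegsF]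
  | cons l ls ih =>
    intro init cur
    by_cases hf : pvFence l
    · rw [List.foldl_cons]
      simp only [hf, if_pos]
      rw [show init ++ [cur] ++ [[]] = (init ++ [cur]) ++ [[]] from rfl, ih (init ++ [cur]) []]
      simp [pvSegsF, hf]
    · rw [List.foldl_cons]
      simp only [hf, if_neg, Bool.false_eq_true, not_false_iff]
      rw [List.dropLast_concat, List.getLastD_concat, ih init (cur ++ [l])]
      simp [pvSegsF, hf]

-- flattening of the even-indexed segments of pvSegsF equals pvRec
theorem pvSegs_kept (ls : List String) : ∀ (cur : List String) (s : Int),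
    ((s % 2 = 0 →
      ((PySem.List.enumerate (pvSegsF cur ls) s).filter (fun p => p.1 % 2 == 0)).flatMap (·.2)
        = cur ++ pvRec false ls) ∧
     (s % 2 = 1 →
      ((PySem.List.enumerate (pvSegsF cur ls) s).filter (fun p => p.1 % 2 == 0)).flatMap (·.2)
        = pvRec true ls)) := by
  induction ls with
  | nil =>
    intro cur s
    constructor <;> intro hs <;>
      simp [pvSegsF, pvRec, PySem.List.enumerate_cons, PySem.List.enumerate_nil,
            List.filter, hs]
  | cons l ls ih =>
    intro cur s
    by_cases hf : pvFence l
    · constructor <;> intro hs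
      · have h1 : (s + 1) % 2 = 1 := by omega
        simp only [pvSegsF, hf, if_pos, PySem.List.enumerate_cons, List.filter_cons,
          beq_iff_eq, hs, List.flatMap_cons]
        rw [(ih [] (s + 1)).2 h1]
        simp [pvRec, hf]
      · have h1 : (s + 1) % 2 = 0 := by omega
        have hs0 : ¬ (s % 2 = 0) := by omega
        simp only [pvSegsF, hf, if_pos, PySem.List.enumerate_cons, List.filter_cons,
          beq_iff_eq, hs0, if_false]
        rw [(ih [] (s + 1)).1 h1]
        simp [pvRec, hf]
    · constructor <;> intro hs
      · simp only [pvSegsF, hf, if_neg, Bool.false_eq_true, not_false_iff,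
          ((ih (cur ++ [l]) s).1 hs)]
        simp [pvRec, hf]
      · simp only [pvSegsF, hf, if_neg, Bool.false_eq_true, not_false_iff,
          ((ih (cur ++ [l]) s).2 hs)]
        simp [pvRec, hf]

-- the two folds produce the same joined text
theorem pv_join (ls : List String) :
    PySem.Str.join "\n" (ls.foldl (fun (st : Bool × List String) line =>
      if pvFence line then (!st.1, st.2)
      else if st.1 then st
      else (st.1, st.2 ++ [line])) (false, [])).2
  = PySem.Str.join "\n" (((PySem.List.enumerate (ls.foldl (fun (segs : List (List String)) line =>
      if pvFence line then segs ++ [[]]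
      else segs.dropLast ++ [segs.getLastD [] ++ [line]]) [[]]) 0).filter
        (fun p => p.1 % 2 == 0)).flatMap (·.2)) := by
  rw [pvA_fold]
  have hB : ls.foldl (fun (segs : List (List String)) line =>
      if pvFence line then segs ++ [[]]
      else segs.dropLast ++ [segs.getLastD [] ++ [line]]) [[]] = pvSegsF [] ls := by
    simpa using pvB_fold ls [] []
  rw [hB, (pvSegs_kept ls [] 0).1 (by norm_num)]

-- ===== VERDICT (by name: the statement is the Claim_ definition above) =====
theorem remove_markdown_blocks_formatting_spec : Claim_equal_remove_markdown_blocks_formatting := by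
  intro text _
  exact pv_join ((PySem.Str.split? text "\n").getD [])
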